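-- pv_equiv track=rewrite | github.com/middeee/aoc_2024 | day_5/ordering_helper.py | find_middle_value
-- ===== SOURCE A (Python) =====
-- def is_correct_order(rules, order):
--     values = [v for k,v in rules.items() if k in order]
--     rule_values = [item for sublist in values for item in sublist]
--     if order[0] not in rule_values or len(order) == 1:
--         return True
--
--     return False
--
-- def find_middle_value(rules, order):
--     result_order = []
--     current_order = [o for o in order]
--     """while len(result_order) < len(order):
--         next_value, index = find_next(rules, current_order)
--         result_order.append(next_value)
--         current_order.pop(index) """
--     while len(current_order) > 0:
--         correct = is_correct_order(rules, current_order)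
--         if correct:
--             result_order.append(current_order[0])
--             current_order.pop(0)
--         else:
--             return 0
--
--     middle_value = result_order[len(result_order) // 2]
--     return middle_value
-- ===== SOURCE B (Python) =====
-- def find_middle_value(rules, order):
--     # One backward pass: maintain the union of rule values for the suffix seen so far.
--     forbidden = set()
--     last = True
--     for v in reversed(order):
--         forbidden.update(rules.get(v, []))
--         if not last and v in forbidden:
--             return 0
--         last = False
--     return order[len(order) // 2]
-- ===== Notes on version B (the rewrite author's own statement) =====
-- stated objective: faster
-- what changed: Instead of re-validating every suffix with a full scan over the rules (rebuilding the flattened rule-value list each round), B makes one backward pass over the order, incrementally growing the set of forbidden values with rules.get(v, []) and testing membership.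
import Mathlib
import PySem

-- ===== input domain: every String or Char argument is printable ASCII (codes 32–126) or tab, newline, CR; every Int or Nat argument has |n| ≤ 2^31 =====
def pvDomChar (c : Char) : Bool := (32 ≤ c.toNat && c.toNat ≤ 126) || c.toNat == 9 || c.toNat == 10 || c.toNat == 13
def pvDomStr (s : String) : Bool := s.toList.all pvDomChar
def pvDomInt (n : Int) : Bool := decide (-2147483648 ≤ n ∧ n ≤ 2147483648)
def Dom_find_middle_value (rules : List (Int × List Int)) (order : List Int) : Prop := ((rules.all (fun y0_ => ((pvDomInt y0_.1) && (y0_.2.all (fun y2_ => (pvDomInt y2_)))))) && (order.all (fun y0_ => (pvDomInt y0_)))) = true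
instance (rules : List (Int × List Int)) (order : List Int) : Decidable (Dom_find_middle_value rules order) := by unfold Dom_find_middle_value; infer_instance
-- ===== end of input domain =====

-- B replaces A's per-step full rescan of the rules with one backward pass growing a forbidden set (asymptotically faster).

-- ===== PORT A =====
def is_correct_order (rules : List (Int × List Int)) (order : List Int) : Bool :=
  let values := (rules.filter (fun kv => order.contains kv.1)).map (fun kv => kv.2)
  let rule_values := values.flatten
  match PySem.List.pyGet? order 0 with
  | some h => !(rule_values.contains h) || (order.length == 1)
  | none => true  -- order[0] raises in Python on empty order; this branch is unreachable in A's calls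

def fmv_loop (rules : List (Int × List Int)) : List Int → List Int → Option (List Int)
  | result, [] => some result
  | result, c :: cs =>
    if is_correct_order rules (c :: cs) then fmv_loop rules (result ++ [c]) cs
    else none

def find_middle_value (rules : List (Int × List Int)) (order : List Int) : Int :=
  match fmv_loop rules [] order with
  | none => 0
  | some result =>
    (PySem.List.pyGet? result (PySem.Int.floordiv (result.length : Int) 2)).getD 0

-- ===== PORT B =====
def fmv_alt_loop (rules : List (Int × List Int)) : List Int → PySem.Set Int → Bool → Bool
  | [], _, _ => true
  | v :: rest, forbidden, last =>
    let forbidden' := PySem.Set.update forbidden ((List.lookup v rules).getD [])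
    if !last && forbidden'.contains v then false
    else fmv_alt_loop rules rest forbidden' false

def find_middle_value_alt (rules : List (Int × List Int)) (order : List Int) : Int :=
  if fmv_alt_loop rules order.reverse PySem.Set.empty true then
    (PySem.List.pyGet? order (PySem.Int.floordiv (order.length : Int) 2)).getD 0
  else 0

-- ===== PRECONDITION & SPEC =====
-- Pre_ excludes empty order (Python A raises IndexError there) and rules lists with duplicate keys
-- (impossible for a real Python dict, whose association-list representation is then ambiguous).
def Pre_find_middle_value (rules : List (Int × List Int)) (order : List Int) : Prop :=
  order ≠ [] ∧ (rules.map Prod.fst).Nodup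
instance (rules : List (Int × List Int)) (order : List Int) : Decidable (Pre_find_middle_value rules order) := by unfold Pre_find_middle_value; infer_instance
def pvWitness_find_middle_value : (List (Int × List Int)) × List Int := ([(1, [2])], [2, 1])

def Spec_find_middle_value (rules : List (Int × List Int)) (order : List Int) (out : Int) : Prop := out = find_middle_value_alt rules order
instance (rules : List (Int × List Int)) (order : List Int) (out : Int) : Decidable (Spec_find_middle_value rules order out) := by unfold Spec_find_middle_value; infer_instance

-- ===== CLAIM (what is proved, stated in full; the proofs are below) =====
def Claim_equal_find_middle_value : Prop := ∀ (rules : List (Int × List Int)) (order : List Int), Dom_find_middle_value rules order → Pre_find_middle_value rules order → Spec_find_middle_value rules order (find_middle_value rules order)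

-- ===== LEMMAS AND PROOFS =====

-- all suffix checks of A's while-loop pass
def goodA (rules : List (Int × List Int)) : List Int → Bool
  | [] => true
  | c :: cs => is_correct_order rules (c :: cs) && goodA rules cs

-- forbidden set after B's loop has consumed r
def fmvF (rules : List (Int × List Int)) : List Int → PySem.Set Int → PySem.Set Int
  | [], S => S
  | v :: rest, S => fmvF rules rest (PySem.Set.update S ((List.lookup v rules).getD []))

lemma fmv_loop_eq (rules : List (Int × List Int)) :
    ∀ (l acc : List Int), fmv_loop rules acc l =
      if goodA rules l then some (acc ++ l) else none := by
  intro l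
  induction l with
  | nil => intro acc; simp [fmv_loop, goodA]
  | cons c cs ih =>
    intro acc
    simp only [fmv_loop, goodA]
    by_cases h : is_correct_order rules (c :: cs) = true
    · rw [if_pos h, ih]
      by_cases hg : goodA rules cs = true <;> simp [h, hg]
    · simp [h]

lemma mem_fmvF (rules : List (Int × List Int)) :
    ∀ (r : List Int) (S : PySem.Set Int) (x : Int),
      x ∈ fmvF rules r S ↔ x ∈ S ∨ ∃ v ∈ r, x ∈ (List.lookup v rules).getD [] := by
  intro r
  induction r with
  | nil => intro S x; simp [fmvF]
  | cons v rest ih =>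
    intro S x
    simp [fmvF, ih, PySem.Set.mem_update]
    tauto

lemma fmv_alt_loop_snoc (rules : List (Int × List Int)) :
    ∀ (r : List Int) (S : PySem.Set Int) (last : Bool) (c : Int),
      fmv_alt_loop rules (r ++ [c]) S last =
        (fmv_alt_loop rules r S last &&
          ((last && decide (r = [])) ||
           !((PySem.Set.update (fmvF rules r S) ((List.lookup c rules).getD [])).contains c))) := by
  intro r
  induction r with
  | nil =>
    intro S last c
    cases last <;> simp [fmv_alt_loop, fmvF]
  | cons v rest ih =>
    intro S last c
    simp only [List.cons_append, fmv_alt_loop, fmvF]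
    rw [ih]
    cases last <;>
      cases h : (PySem.Set.update S ((List.lookup v rules).getD [])).contains v <;>
        simp

lemma lookup_of_mem_nodup {k : Int} {vs : List Int} :
    ∀ (rules : List (Int × List Int)), (rules.map Prod.fst).Nodup → (k, vs) ∈ rules →
      List.lookup k rules = some vs := by
  intro rules
  induction rules with
  | nil => simp
  | cons kv rest ih =>
    intro hnd hmem
    simp only [List.map_cons, List.nodup_cons] at hnd
    rcases List.mem_cons.mp hmem with h | h
    · simp [List.lookup, ← h]
    · have hne : k ≠ kv.1 := by
        intro he
        exact hnd.1 (by simpa [← he] using List.mem_map_of_mem (f := Prod.fst) h)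
      have hb : (k == kv.1) = false := by simpa using hne
      simp [List.lookup, hb, ih hnd.2 h]

lemma mem_of_lookup {k : Int} {vs : List Int} :
    ∀ (rules : List (Int × List Int)), List.lookup k rules = some vs → (k, vs) ∈ rules := by
  intro rules
  induction rules with
  | nil => simp
  | cons kv rest ih =>
    intro h
    simp only [List.lookup] at h
    by_cases he : k = kv.1
    · have hb : (k == kv.1) = true := by simpa using he
      simp only [hb] at h
      have h2 : kv.2 = vs := by injection h
      have : (k, vs) = kv := by cases kv; simp [he] at *; tauto
      rw [this]
      exact List.mem_cons_self
    · have hb : (k == kv.1) = false := by simpa using he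
      simp only [hb] at h
      exact List.mem_cons_of_mem _ (ih h)

-- membership in A's flattened rule_values = existence of a rule reachable through dict.get (under Nodup keys)
lemma rule_values_mem (rules : List (Int × List Int)) (hnd : (rules.map Prod.fst).Nodup)
    (l : List Int) (x : Int) :
    (((rules.filter (fun kv => l.contains kv.1)).map (fun kv => kv.2)).flatten.contains x = true)
      ↔ ∃ v ∈ l, x ∈ (List.lookup v rules).getD [] := by
  simp only [List.contains_iff_mem, List.mem_flatten, List.mem_map, List.mem_filter]
  constructor
  · rintro ⟨vs, ⟨kv, ⟨hkv, hkl⟩, rfl⟩, hx⟩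
    refine ⟨kv.1, by simpa using hkl, ?_⟩
    rw [lookup_of_mem_nodup rules hnd (by simpa using hkv)]
    simpa using hx
  · rintro ⟨v, hv, hx⟩
    cases hlk : List.lookup v rules with
    | none => simp [hlk] at hx
    | some vs =>
      rw [hlk] at hx
      exact ⟨vs, ⟨(v, vs), ⟨mem_of_lookup rules hlk, by simpa using hv⟩, rfl⟩, by simpa using hx⟩

lemma alt_eq_goodA (rules : List (Int × List Int)) (hnd : (rules.map Prod.fst).Nodup) :
    ∀ (l : List Int), fmv_alt_loop rules l.reverse PySem.Set.empty true = goodA rules l := by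
  intro l
  induction l with
  | nil => simp [fmv_alt_loop, goodA]
  | cons c cs ih =>
    rw [List.reverse_cons, fmv_alt_loop_snoc, ih]
    simp only [goodA]
    have hco : is_correct_order rules (c :: cs) =
        (!((((rules.filter (fun kv => (c :: cs).contains kv.1)).map (fun kv => kv.2)).flatten).contains c)
          || ((c :: cs).length == 1)) := by
      simp [is_correct_order]
    have hmem : ((PySem.Set.update (fmvF rules cs.reverse PySem.Set.empty)
          ((List.lookup c rules).getD [])).contains c)
        = (((rules.filter (fun kv => (c :: cs).contains kv.1)).map (fun kv => kv.2)).flatten).contains c := by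
      by_cases h : ∃ v ∈ (c :: cs), c ∈ (List.lookup v rules).getD []
      · have h1 : ((PySem.Set.update (fmvF rules cs.reverse PySem.Set.empty)
            ((List.lookup c rules).getD [])).contains c) = true := by
          rw [PySem.Set.contains_iff]  -- contains ↔ ∈
          rw [PySem.Set.mem_update, mem_fmvF]
          rcases h with ⟨v, hv, hx⟩
          rcases List.mem_cons.mp hv with rfl | hv'
          · right; exact hx
          · left; right; exact ⟨v, by simpa using hv', hx⟩
        rw [h1, ((rule_values_mem rules hnd (c :: cs) c).mpr h)]
      · have h1 : ¬ ((PySem.Set.update (fmvF rules cs.reverse PySem.Set.empty)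
            ((List.lookup c rules).getD [])).contains c = true) := by
          rw [PySem.Set.contains_iff, PySem.Set.mem_update, mem_fmvF]
          rintro (⟨hf | ⟨v, hv, hx⟩⟩ | hc)
          · simp [PySem.Set.empty] at hf
          · exact h ⟨v, List.mem_cons_of_mem _ (by simpa using hv), hx⟩
          · exact h ⟨c, List.mem_cons_self, hc⟩
        have h2 : ¬ ((((rules.filter (fun kv => (c :: cs).contains kv.1)).map (fun kv => kv.2)).flatten).contains c = true) := by
          intro hc
          exact h ((rule_values_mem rules hnd (c :: cs) c).mp hc)
        simp only [Bool.not_eq_true] at h1 h2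
        rw [h1, h2]
    rw [hco, hmem]
    cases hgc : goodA rules cs <;>
      cases hm : (((rules.filter (fun kv => (c :: cs).contains kv.1)).map (fun kv => kv.2)).flatten).contains c <;>
      rcases cs with _ | ⟨d, ds⟩ <;> simp_all

-- ===== VERDICT (by name: the statement is the Claim_ definition above) =====
theorem find_middle_value_spec : Claim_equal_find_middle_value := by
  intro rules order _ hpre
  unfold Spec_find_middle_value find_middle_value find_middle_value_alt
  rw [fmv_loop_eq, alt_eq_goodA rules hpre.2]
  cases h : goodA rules order <;> simp
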